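-- pv_equiv track=rewrite | github.com/FatemRahimi/codewars-python | consecutiveLetter.py | solve
-- ===== SOURCE A (Python) =====
-- def solve(st):
--     b = list(st)
--     c = []
--     for i in range(len(st)):
--         c.append(ord(b[i]))
--     for i in c:
--         if c.count(i) != 1:
--             return False
--     for i in range(min(c),max(c)):
--         if i+1 not in c:
--             return False
--     return True
-- ===== SOURCE B (Python) =====
-- def solve(st):
--     c = sorted(ord(x) for x in st)
--     return c == list(range(min(c), max(c) + 1))
-- ===== Notes on version B (the rewrite author's own statement) =====
-- stated objective: simpler
-- what changed: replaces A's quadratic count-based uniqueness loop and per-gap membership loop with one sort of the code points compared against the full range min..max, which checks distinctness and consecutiveness in a single comparison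
import Mathlib
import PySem

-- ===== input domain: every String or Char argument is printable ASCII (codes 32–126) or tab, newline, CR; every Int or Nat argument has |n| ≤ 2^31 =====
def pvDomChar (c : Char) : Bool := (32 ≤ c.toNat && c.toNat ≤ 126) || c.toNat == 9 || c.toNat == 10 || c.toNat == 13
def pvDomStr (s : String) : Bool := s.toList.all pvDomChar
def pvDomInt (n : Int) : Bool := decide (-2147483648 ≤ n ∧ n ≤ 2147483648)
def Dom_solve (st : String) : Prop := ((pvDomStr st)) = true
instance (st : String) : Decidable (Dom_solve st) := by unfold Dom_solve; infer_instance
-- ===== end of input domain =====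

-- B replaces A's count-based uniqueness loop and per-gap membership loop by one
-- sort of the code points compared against the full range min..max (simpler structure).

-- ===== PORT A =====
def solve (st : String) : Bool :=
  let b := st.toList
  let c : List Int := (PySem.List.pyRange 0 (PySem.List.len b) 1).foldl
      (fun acc i => acc ++ [((PySem.List.pyGetD b i ' ').toNat : Int)]) []
  if c.all (fun i => PySem.List.count c i == 1) then
    match PySem.List.min? c (fun x => x), PySem.List.max? c (fun x => x) with
    | some lo, some hi => (PySem.List.pyRange lo hi 1).all (fun i => decide ((i + 1) ∈ c))
    | _, _ => false  -- Python raises ValueError here (min of empty sequence); excluded by Pre_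
  else false

-- ===== PORT B =====
def solve_alt (st : String) : Bool :=
  let c := PySem.List.sorted (st.toList.map (fun x => (x.toNat : Int))) (fun x => x) false
  (PySem.List.min? c (fun x => x)).elim false fun lo =>
    (PySem.List.max? c (fun x => x)).elim false fun hi =>
      c == PySem.List.pyRange lo (hi + 1) 1
  -- Option.elim false: Python raises ValueError on the empty string (min of empty); excluded by Pre_

-- ===== PRECONDITION & SPEC =====
-- Pre_ excludes only the empty string, on which both A and B raise ValueError (min of an empty sequence).
def Pre_solve (st : String) : Prop := st ≠ ""
instance (st : String) : Decidable (Pre_solve st) := by unfold Pre_solve; infer_instance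
def pvWitness_solve : String := "abc"
def Spec_solve (st : String) (out : Bool) : Prop := out = solve_alt st
instance (st : String) (out : Bool) : Decidable (Spec_solve st out) := by unfold Spec_solve; infer_instance

-- ===== CLAIM (what is proved, stated in full; the proofs are below) =====
def Claim_equal_solve : Prop := ∀ (st : String), Dom_solve st → Pre_solve st → Spec_solve st (solve st)

-- ===== LEMMAS AND PROOFS =====

-- min? equality under same membership
lemma min?_congr_mem (xs ys : List Int) (h : ∀ a : Int, a ∈ xs ↔ a ∈ ys) :
    PySem.List.min? xs (fun x => x) = PySem.List.min? ys (fun x => x) := by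
  cases hx : PySem.List.min? xs (fun x : Int => x) with
  | none =>
      rw [PySem.List.min?_eq_none_iff] at hx
      subst hx
      cases hy : PySem.List.min? ys (fun x : Int => x) with
      | none => rfl
      | some m =>
          have := PySem.List.min?_mem hy
          exact absurd ((h m).mpr this) (List.not_mem_nil)
  | some m =>
      cases hy : PySem.List.min? ys (fun x : Int => x) with
      | none =>
          rw [PySem.List.min?_eq_none_iff] at hy; subst hy
          exact absurd ((h m).mp (PySem.List.min?_mem hx)) (List.not_mem_nil)
      | some m' =>
          have h1 := PySem.List.min?_isMin hx _ ((h m').mpr (PySem.List.min?_mem hy))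
          have h2 := PySem.List.min?_isMin hy _ ((h m).mp (PySem.List.min?_mem hx))
          simp only [Option.some_inj]
          omega

lemma max?_congr_mem (xs ys : List Int) (h : ∀ a : Int, a ∈ xs ↔ a ∈ ys) :
    PySem.List.max? xs (fun x => x) = PySem.List.max? ys (fun x => x) := by
  cases hx : PySem.List.max? xs (fun x : Int => x) with
  | none =>
      rw [PySem.List.max?_eq_none_iff] at hx
      subst hx
      cases hy : PySem.List.max? ys (fun x : Int => x) with
      | none => rfl
      | some m =>
          have := PySem.List.max?_mem hy
          exact absurd ((h m).mpr this) (List.not_mem_nil)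
  | some m =>
      cases hy : PySem.List.max? ys (fun x : Int => x) with
      | none =>
          rw [PySem.List.max?_eq_none_iff] at hy; subst hy
          exact absurd ((h m).mp (PySem.List.max?_mem hx)) (List.not_mem_nil)
      | some m' =>
          have h1 := PySem.List.max?_isMax hx _ ((h m').mpr (PySem.List.max?_mem hy))
          have h2 := PySem.List.max?_isMax hy _ ((h m).mp (PySem.List.max?_mem hx))
          simp only [Option.some_inj]
          omega

lemma main_iff (l : List Int) (lo hi : Int)
    (hlo : PySem.List.min? l (fun x => x) = some lo)
    (hhi : PySem.List.max? l (fun x => x) = some hi) :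
    ((∀ i ∈ l, l.count i = 1) ∧ (∀ i : Int, lo ≤ i → i < hi → (i + 1) ∈ l))
      ↔ PySem.List.sorted l (fun x => x) false = PySem.List.pyRange lo (hi + 1) 1 := by
  constructor
  · rintro ⟨h1, h2⟩
    have hnd : l.Nodup := List.nodup_iff_count_eq_one.mpr h1
    have hmem : ∀ x : Int, x ∈ l ↔ lo ≤ x ∧ x ≤ hi := by
      intro x
      constructor
      · intro hx
        exact ⟨PySem.List.min?_isMin hlo _ hx, PySem.List.max?_isMax hhi _ hx⟩
      · rintro ⟨ha, hb⟩
        rcases eq_or_lt_of_le ha with h | h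
        · rw [← h]; exact PySem.List.min?_mem hlo
        · have := h2 (x - 1) (by omega) (by omega)
          simpa using this
    have hperm : (PySem.List.pyRange lo (hi + 1) 1).Perm l := by
      rw [List.perm_ext_iff_of_nodup (PySem.List.nodup_pyRange_one _ _) hnd]
      intro a
      rw [PySem.List.mem_pyRange_one, hmem]
      omega
    exact PySem.List.sorted_eq_of_perm_of_pairwise_lt _ _ _ hperm (PySem.List.pairwise_lt_pyRange_one _ _)
  · intro hs
    have hperm : (PySem.List.pyRange lo (hi + 1) 1).Perm l := by
      rw [← hs]; exact PySem.List.sorted_perm l _ _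
    have hnd : l.Nodup := hperm.nodup (PySem.List.nodup_pyRange_one _ _)
    refine ⟨fun i hi' => List.count_eq_one_of_mem hnd hi', fun i hA hB => ?_⟩
    exact hperm.mem_iff.mp (PySem.List.mem_pyRange_one.mpr (by omega))

lemma cA_eq (b : List Char) :
    (PySem.List.pyRange 0 (PySem.List.len b) 1).foldl
      (fun acc i => acc ++ [((PySem.List.pyGetD b i ' ').toNat : Int)]) []
    = b.map (fun x => (x.toNat : Int)) := by
  rw [PySem.List.foldl_append_singleton_eq_map (fun i => (((PySem.List.pyGetD b i ' ').toNat : Int)))]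
  rw [show (fun i => (((PySem.List.pyGetD b i ' ').toNat : Int)))
      = (fun x : Char => (x.toNat : Int)) ∘ (fun j => PySem.List.pyGetD b j ' ') from rfl,
    ← List.map_map, PySem.List.map_pyGetD_pyRange_zero]
  simp

theorem ports_agree (st : String) (hpre : st ≠ "") : solve st = solve_alt st := by
  unfold solve solve_alt
  simp only [cA_eq]
  set l := st.toList.map (fun x => (x.toNat : Int)) with hl
  have hne : l ≠ [] := by
    intro hc
    rw [hl, List.map_eq_nil_iff] at hc
    exact hpre (by rwa [List.eq_nil_iff_length_eq_zero, String.length_toList, String.length_eq_zero_iff] at hc)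
  have hms : ∀ a : Int, a ∈ PySem.List.sorted l (fun x => x) false ↔ a ∈ l :=
    fun a => PySem.List.mem_sorted l _ _ a
  have hmin := min?_congr_mem _ _ hms
  have hmax := max?_congr_mem _ _ hms
  rw [hmin, hmax]
  cases hlo : PySem.List.min? l (fun x : Int => x) with
  | none => rw [PySem.List.min?_eq_none_iff] at hlo; exact absurd hlo hne
  | some lo =>
  cases hhi : PySem.List.max? l (fun x : Int => x) with
  | none => rw [PySem.List.max?_eq_none_iff] at hhi; exact absurd hhi hne
  | some hi =>
  simp only [Option.elim]
  have hiff := main_iff l lo hi hlo hhi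
  by_cases hcount : ∀ i ∈ l, l.count i = 1
  · by_cases hgap : ∀ i : Int, lo ≤ i → i < hi → (i + 1) ∈ l
    · have hsorted := hiff.mp ⟨hcount, hgap⟩
      rw [if_pos, hsorted]
      · simp only [beq_self_eq_true, List.all_eq_true, decide_eq_true_eq,
          PySem.List.mem_pyRange_one]
        exact fun x h1 => hgap x h1.1 h1.2
      · simp only [List.all_eq_true, beq_iff_eq, PySem.List.count_eq]
        intro i hi'; exact hcount i hi'
    · rw [if_pos]
      · have : ¬ PySem.List.sorted l (fun x => x) false = PySem.List.pyRange lo (hi + 1) 1 :=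
          fun h => hgap fun i h1 h2 => (hiff.mpr h).2 i h1 h2
        have hA : ¬ ((PySem.List.pyRange lo hi 1).all (fun i => decide ((i + 1) ∈ l)) = true) := by
          simp only [List.all_eq_true, decide_eq_true_eq, PySem.List.mem_pyRange_one]
          push Not
          push Not at hgap
          obtain ⟨i, h1, h2, h3⟩ := hgap
          exact ⟨i, ⟨h1, h2⟩, h3⟩
        simp only [Bool.not_eq_true] at hA
        rw [hA]
        simp [this]
      · simp only [List.all_eq_true, beq_iff_eq, PySem.List.count_eq]
        intro i hi'; exact hcount i hi'
  · rw [if_neg]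
    · have : ¬ PySem.List.sorted l (fun x => x) false = PySem.List.pyRange lo (hi + 1) 1 :=
        fun h => hcount fun i h1 => (hiff.mpr h).1 i h1
      simp [this]
    · simp only [List.all_eq_true, beq_iff_eq, PySem.List.count_eq]
      push Not at hcount ⊢
      obtain ⟨i, h1, h2⟩ := hcount
      exact ⟨i, h1, h2⟩

-- ===== VERDICT (by name: the statement is the Claim_ definition above) =====
theorem solve_spec : Claim_equal_solve := by
  intro st _ hpre
  unfold Spec_solve
  exact ports_agree st hpre
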